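-- pv_equiv track=rewrite | github.com/kevintaing86/ntontm | encodesTM.py | functional
-- ===== SOURCE A (Python) =====
-- def functional(table):
--     """
--     Checks if table has 2 distinct tuples where the first 2 coordinates are the same.
--     If so return false
--     Otherwise return true
--     :param table: a set of 5-tuples
--     :return: Boolean
--     """
--     if table == []:
--         return False
--     for t1 in table:
--         for t2 in table:
--             if t1[0:2] == t2[0:2] and t1[2:6] != t2[2:6]:
--                 return False
--     return True
-- ===== SOURCE B (Python) =====
-- def functional(table):
--     if table == []:
--         return False
--     seen = {}
--     for t in table:
--         key = tuple(t[0:2])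
--         rest = tuple(t[2:6])
--         prev = seen.get(key)
--         if prev is None:
--             seen[key] = rest
--         elif prev != rest:
--             return False
--     return True
-- ===== Notes on version B (the rewrite author's own statement) =====
-- stated objective: faster
-- what changed: Replaced the all-pairs nested scan by a single pass that records the first suffix seen for each 2-coordinate prefix in a dict and reports a conflict on a mismatching lookup.
import Mathlib
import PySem

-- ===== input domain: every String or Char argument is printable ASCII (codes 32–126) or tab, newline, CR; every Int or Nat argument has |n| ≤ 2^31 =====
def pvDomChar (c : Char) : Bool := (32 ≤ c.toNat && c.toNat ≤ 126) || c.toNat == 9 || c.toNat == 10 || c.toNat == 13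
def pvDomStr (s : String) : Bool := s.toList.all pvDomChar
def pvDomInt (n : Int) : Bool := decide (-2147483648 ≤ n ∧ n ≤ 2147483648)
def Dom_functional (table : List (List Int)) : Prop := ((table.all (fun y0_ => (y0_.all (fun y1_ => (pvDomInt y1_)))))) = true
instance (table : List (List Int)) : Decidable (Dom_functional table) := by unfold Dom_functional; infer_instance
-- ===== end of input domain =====

-- B replaces A's O(n^2) all-pairs scan by one pass with a dict keyed by t[0:2]; return value only, no mutation.

-- ===== PORT A =====
def functional (table : List (List Int)) : Bool :=
  if table = [] then false
  else if table.any (fun t1 => table.any (fun t2 =>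
      PySem.List.slice t1 (some 0) (some 2) == PySem.List.slice t2 (some 0) (some 2) &&
      !(PySem.List.slice t1 (some 2) (some 6) == PySem.List.slice t2 (some 2) (some 6))))
  then false else true

-- ===== PORT B =====
def pvKey (t : List Int) : List Int := PySem.List.slice t (some 0) (some 2)
def pvRest (t : List Int) : List Int := PySem.List.slice t (some 2) (some 6)

def functionalGo : List (List Int) → PySem.Dict (List Int) (List Int) → Bool
  | [], _ => true
  | t :: ts, seen =>
    match seen.get? (pvKey t) with
    | none => functionalGo ts (seen.insert (pvKey t) (pvRest t))
    | some prev => if prev = pvRest t then functionalGo ts seen else false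

def functional_alt (table : List (List Int)) : Bool :=
  if table = [] then false
  else functionalGo table PySem.Dict.empty

-- ===== PRECONDITION & SPEC =====
def Spec_functional (table : List (List Int)) (out : Bool) : Prop := out = functional_alt table
instance (table : List (List Int)) (out : Bool) : Decidable (Spec_functional table out) := by unfold Spec_functional; infer_instance

-- ===== CLAIM (what is proved, stated in full; the proofs are below) =====
def Claim_equal_functional : Prop := ∀ (table : List (List Int)), Dom_functional table → Spec_functional table (functional table)

-- ===== LEMMAS AND PROOFS =====

lemma go_true_iff (l : List (List Int)) (seen : PySem.Dict (List Int) (List Int)) :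
    functionalGo l seen = true ↔
      ((∀ t ∈ l, ∀ v, seen.get? (pvKey t) = some v → v = pvRest t) ∧
       ∀ t1 ∈ l, ∀ t2 ∈ l, pvKey t1 = pvKey t2 → pvRest t1 = pvRest t2) := by
  induction l generalizing seen with
  | nil => simp [functionalGo]
  | cons t ts ih =>
    cases hg : seen.get? (pvKey t) with
    | none =>
      rw [show functionalGo (t :: ts) seen = functionalGo ts (seen.insert (pvKey t) (pvRest t)) by
        simp only [functionalGo, hg]]
      rw [ih]
      constructor
      · rintro ⟨h1, h2⟩
        refine ⟨?_, ?_⟩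
        · intro t' ht' v hv
          rcases List.mem_cons.mp ht' with he | ht'
          · subst he; rw [hg] at hv; cases hv
          · have hne : pvKey t' ≠ pvKey t := by
              intro he; rw [he, hg] at hv; cases hv
            exact h1 t' ht' v (by rwa [PySem.Dict.get?_insert, if_neg hne])
        · intro t1 h1m t2 h2m hk
          rcases List.mem_cons.mp h1m with h1e | h1m <;> rcases List.mem_cons.mp h2m with h2e | h2m
          · rw [h1e, h2e]
          · rw [h1e]
            exact h1 t2 h2m (pvRest t) (by rw [PySem.Dict.get?_insert, if_pos (by rw [← hk, h1e])])
          · rw [h2e]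
            exact (h1 t1 h1m (pvRest t) (by rw [PySem.Dict.get?_insert, if_pos (by rw [hk, h2e])])).symm
          · exact h2 t1 h1m t2 h2m hk
      · rintro ⟨h1, h2⟩
        refine ⟨?_, ?_⟩
        · intro t' ht' v hv
          by_cases he : pvKey t' = pvKey t
          · rw [PySem.Dict.get?_insert, if_pos he] at hv
            cases hv
            exact (h2 t (List.mem_cons_self ..) t' (List.mem_cons_of_mem _ ht') he.symm)
          · rw [PySem.Dict.get?_insert, if_neg he] at hv
            exact h1 t' (List.mem_cons_of_mem _ ht') v hv
        · intro t1 h1m t2 h2m hk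
          exact h2 t1 (List.mem_cons_of_mem _ h1m) t2 (List.mem_cons_of_mem _ h2m) hk
    | some prev =>
      rw [show functionalGo (t :: ts) seen =
          (if prev = pvRest t then functionalGo ts seen else false) by
        simp only [functionalGo, hg]]
      by_cases hp : prev = pvRest t
      · rw [if_pos hp, ih]
        constructor
        · rintro ⟨h1, h2⟩
          refine ⟨?_, ?_⟩
          · intro t' ht' v hv
            rcases List.mem_cons.mp ht' with he | ht'
            · subst he; rw [hg] at hv; cases hv; exact hp
            · exact h1 t' ht' v hv
          · intro t1 h1m t2 h2m hk
            rcases List.mem_cons.mp h1m with h1e | h1m <;> rcases List.mem_cons.mp h2m with h2e | h2m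
            · rw [h1e, h2e]
            · have := h1 t2 h2m prev (by rw [← hk, h1e]; exact hg)
              rw [h1e, ← this, ← hp]
            · have := h1 t1 h1m prev (by rw [hk, h2e]; exact hg)
              rw [h2e, ← this, ← hp]
            · exact h2 t1 h1m t2 h2m hk
        · rintro ⟨h1, h2⟩
          exact ⟨fun t' ht' v hv => h1 t' (List.mem_cons_of_mem _ ht') v hv,
                 fun t1 h1m t2 h2m hk => h2 t1 (List.mem_cons_of_mem _ h1m) t2 (List.mem_cons_of_mem _ h2m) hk⟩
      · rw [if_neg hp]
        constructor
        · intro h; cases h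
        · rintro ⟨h1, -⟩
          exact absurd (h1 t (List.mem_cons_self ..) prev hg) hp
    
lemma functional_true_iff (table : List (List Int)) :
    functional table = true ↔
      table ≠ [] ∧ ∀ t1 ∈ table, ∀ t2 ∈ table, pvKey t1 = pvKey t2 → pvRest t1 = pvRest t2 := by
  unfold functional
  split_ifs with h0 h1
  · simp [h0]
  · simp only [false_iff, not_and]
    intro _
    simp only [List.any_eq_true, Bool.and_eq_true, beq_iff_eq, Bool.not_eq_true',
      beq_eq_false_iff_ne, ne_eq] at h1
    obtain ⟨t1, ht1, t2, ht2, hk, hr⟩ := h1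
    intro h
    exact hr (h t1 ht1 t2 ht2 hk)
  · simp only [true_iff]
    refine ⟨h0, fun t1 ht1 t2 ht2 hk => ?_⟩
    by_contra hr
    exact h1 (by
      simp only [List.any_eq_true, Bool.and_eq_true, beq_iff_eq, Bool.not_eq_true',
        beq_eq_false_iff_ne, ne_eq]
      exact ⟨t1, ht1, t2, ht2, hk, hr⟩)

lemma functional_alt_true_iff (table : List (List Int)) :
    functional_alt table = true ↔
      table ≠ [] ∧ ∀ t1 ∈ table, ∀ t2 ∈ table, pvKey t1 = pvKey t2 → pvRest t1 = pvRest t2 := by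
  unfold functional_alt
  split_ifs with h0
  · simp [h0]
  · rw [go_true_iff]
    simp [PySem.Dict.get?_empty, h0]

-- ===== VERDICT (by name: the statement is the Claim_ definition above) =====
theorem functional_spec : Claim_equal_functional := by
  intro table _
  unfold Spec_functional
  have := (functional_true_iff table).trans (functional_alt_true_iff table).symm
  cases h : functional table with
  | true => exact (this.mp h).symm
  | false =>
    cases h' : functional_alt table with
    | true => rw [h] at this; exact absurd (this.mpr h') (by simp)
    | false => rfl
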